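-- pv_equiv track=rewrite | github.com/k-roy/RECTIFY | rectify/core/chimeric_consensus.py | _merge_cigar_ops
-- ===== SOURCE A (Python) =====
-- from typing import Dict, List, Optional, Tuple, Set
--
-- def _merge_cigar_ops(ops: List[Tuple[int, int]]) -> List[Tuple[int, int]]:
--     """Merge adjacent CIGAR operations of the same type."""
--     if not ops:
--         return []
--
--     merged = [ops[0]]
--     for op, length in ops[1:]:
--         if op == merged[-1][0]:
--             merged[-1] = (op, merged[-1][1] + length)
--         else:
--             merged.append((op, length))
--
--     # Remove zero-length operations
--     return [(op, length) for op, length in merged if length > 0]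
-- ===== SOURCE B (Python) =====
-- from typing import List, Tuple
--
-- def _merge_cigar_ops(ops: List[Tuple[int, int]]) -> List[Tuple[int, int]]:
--     """Merge adjacent CIGAR operations of the same type (divide and conquer)."""
--     merged = _merge_runs(ops)
--     return [(op, length) for op, length in merged if length > 0]
--
-- def _merge_runs(ops: List[Tuple[int, int]]) -> List[Tuple[int, int]]:
--     if len(ops) <= 1:
--         return list(ops)
--     mid = len(ops) // 2
--     return _combine(_merge_runs(ops[:mid]), _merge_runs(ops[mid:]))
--
-- def _combine(left: List[Tuple[int, int]], right: List[Tuple[int, int]]) -> List[Tuple[int, int]]: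
--     if left and right and left[-1][0] == right[0][0]:
--         op, l1 = left[-1]
--         l2 = right[0][1]
--         return left[:-1] + [(op, l1 + l2)] + right[1:]
--     return left + right
-- ===== Notes on version B (the rewrite author's own statement) =====
-- stated objective: alternative
-- what changed: Replaces A's single left-to-right pass that mutates the last accumulator element with a divide-and-conquer recursion: split the list in half, merge each half's runs recursively, and combine the two results by fusing the boundary pair when the op codes match; the zero-length filter stays as a final pass.
import Mathlib
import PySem

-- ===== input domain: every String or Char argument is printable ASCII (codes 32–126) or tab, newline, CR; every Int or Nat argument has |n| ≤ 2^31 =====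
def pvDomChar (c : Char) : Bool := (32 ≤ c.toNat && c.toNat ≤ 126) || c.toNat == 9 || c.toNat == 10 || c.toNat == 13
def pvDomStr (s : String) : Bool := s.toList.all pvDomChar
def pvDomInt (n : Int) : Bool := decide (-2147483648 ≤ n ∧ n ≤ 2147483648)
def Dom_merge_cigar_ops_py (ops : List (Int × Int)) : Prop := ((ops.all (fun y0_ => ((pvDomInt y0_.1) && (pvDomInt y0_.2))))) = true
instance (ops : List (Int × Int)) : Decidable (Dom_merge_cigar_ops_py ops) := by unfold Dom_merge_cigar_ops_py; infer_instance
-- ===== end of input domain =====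

-- B replaces A's single-pass last-element-mutating loop with a divide-and-conquer
-- recursion (merge each half's runs, fuse at the boundary); alternative algorithm, not faster.


-- ===== PORT A =====
-- A's loop keeps `merged` and mutates its last element; ported with `merged`
-- held in REVERSED order (head = Python's merged[-1]), reversed at the end.
def mergeALoop (rev : List (Int × Int)) (rest : List (Int × Int)) : List (Int × Int) :=
  match rest with
  | [] => rev.reverse
  | (op, length) :: t =>
    match rev with
    | (o, l) :: rs =>
      if op == o then mergeALoop ((op, l + length) :: rs) t
      else mergeALoop ((op, length) :: (o, l) :: rs) t
    | [] => rev.reverse  -- unreachable: rev starts non-empty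

def merge_cigar_ops_py (ops : List (Int × Int)) : List (Int × Int) :=
  match ops with
  | [] => []
  | h :: t => (mergeALoop [h] t).filter (fun p => p.2 > 0)

-- ===== PORT B =====
-- _combine: fuse the boundary pair when left's last op equals right's first op
-- (Python's `left and right and left[-1][0] == right[0][0]`; left[:-1] = dropLast, right[1:] = tail).
def combineB (left right : List (Int × Int)) : List (Int × Int) :=
  match left.getLast?, right with
  | some lp, rp :: rt =>
    if lp.1 == rp.1 then left.dropLast ++ [(lp.1, lp.2 + rp.2)] ++ rt
    else left ++ right
  | _, _ => left ++ right

-- _merge_runs: ops[:mid] / ops[mid:] with 0 ≤ mid ≤ len are exactly take/drop.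
def mergeRunsB (ops : List (Int × Int)) : List (Int × Int) :=
  if ops.length ≤ 1 then ops
  else combineB (mergeRunsB (ops.take (ops.length / 2))) (mergeRunsB (ops.drop (ops.length / 2)))
termination_by ops.length
decreasing_by
  · simp only [List.length_take]; omega
  · simp only [List.length_drop]; omega

def merge_cigar_ops_py_alt (ops : List (Int × Int)) : List (Int × Int) :=
  (mergeRunsB ops).filter (fun p => p.2 > 0)

-- ===== PRECONDITION & SPEC =====
def Spec_merge_cigar_ops_py (ops : List (Int × Int)) (out : List (Int × Int)) : Prop := out = merge_cigar_ops_py_alt ops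
instance (ops : List (Int × Int)) (out : List (Int × Int)) : Decidable (Spec_merge_cigar_ops_py ops out) := by unfold Spec_merge_cigar_ops_py; infer_instance

-- ===== CLAIM (what is proved, stated in full; the proofs are below) =====
def Claim_equal_merge_cigar_ops_py : Prop := ∀ (ops : List (Int × Int)), Dom_merge_cigar_ops_py ops → Spec_merge_cigar_ops_py ops (merge_cigar_ops_py ops)

-- ===== LEMMAS AND PROOFS =====

-- Proof-side structural version of _combine (recursion to the last element of the left list).
def combineRec : List (Int × Int) → List (Int × Int) → List (Int × Int)
  | [], ys => ys
  | [x], [] => [x]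
  | [x], y :: yt => if x.1 == y.1 then (x.1, x.2 + y.2) :: yt else x :: y :: yt
  | x :: y :: xs, ys => x :: combineRec (y :: xs) ys

-- Canonical right fold merging runs from the front.
def stepC (x : Int × Int) (acc : List (Int × Int)) : List (Int × Int) :=
  match acc with
  | [] => [x]
  | y :: t => if x.1 == y.1 then (x.1, x.2 + y.2) :: t else x :: y :: t

def canonC (ops : List (Int × Int)) : List (Int × Int) := ops.foldr stepC []

lemma combineRec_nil_right : ∀ (l : List (Int × Int)), combineRec l [] = l
  | [] => rfl
  | [_] => rfl
  | _ :: y :: xs => by simp [combineRec, combineRec_nil_right (y :: xs)]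

lemma combineRec_singleton (x : Int × Int) (v : List (Int × Int)) :
    combineRec [x] v = stepC x v := by
  cases v <;> simp [combineRec, stepC]

lemma combineRec_head (y : Int × Int) (u' v : List (Int × Int)) :
    ∃ m t, combineRec (y :: u') v = (y.1, m) :: t := by
  cases u' with
  | nil =>
    cases v with
    | nil => exact ⟨y.2, [], rfl⟩
    | cons z zt =>
      by_cases h : y.1 = z.1
      · exact ⟨y.2 + z.2, zt, by simp [combineRec, h]⟩
      · exact ⟨y.2, z :: zt, by simp [combineRec, h]⟩
  | cons w u'' => exact ⟨y.2, combineRec (w :: u'') v, by simp [combineRec]⟩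

lemma step_combine (x : Int × Int) (u v : List (Int × Int)) :
    combineRec (stepC x u) v = stepC x (combineRec u v) := by
  cases u with
  | nil =>
    rw [show stepC x [] = [x] from rfl, show combineRec [] v = v from rfl, combineRec_singleton]
  | cons y u' =>
    by_cases hxy : x.1 = y.1
    · simp only [stepC, hxy, beq_self_eq_true, if_true]
      cases u' with
      | nil =>
        cases v with
        | nil => simp [combineRec, stepC]
        | cons z zt =>
          by_cases hyz : y.1 = z.1
          · simp [combineRec, stepC, hyz, add_assoc]
          · simp [combineRec, stepC, hyz]
      | cons w u'' => simp [combineRec, stepC]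
    · simp only [stepC, beq_iff_eq, hxy, if_false]
      obtain ⟨m, t, hE⟩ := combineRec_head y u' v
      rw [show combineRec (x :: y :: u') v = x :: combineRec (y :: u') v from by simp [combineRec]]
      rw [hE]
      simp [stepC, hxy]

lemma combineRec_assoc : ∀ (a b c : List (Int × Int)),
    combineRec (combineRec a b) c = combineRec a (combineRec b c) := by
  intro a
  induction a with
  | nil => intro b c; simp [combineRec]
  | cons x a' ih =>
    intro b c
    cases a' with
    | nil => simpa [combineRec_singleton] using step_combine x b c
    | cons y xs =>
      obtain ⟨m, t, hE⟩ := combineRec_head y xs b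
      rw [show combineRec (x :: y :: xs) b = x :: combineRec (y :: xs) b from by simp [combineRec],
          hE, show combineRec (x :: (y.1, m) :: t) c = x :: combineRec ((y.1, m) :: t) c from by simp [combineRec],
          ← hE, ih b c,
          show combineRec (x :: y :: xs) (combineRec b c) = x :: combineRec (y :: xs) (combineRec b c) from by simp [combineRec]]

lemma canonC_append (a b : List (Int × Int)) :
    canonC (a ++ b) = combineRec (canonC a) (canonC b) := by
  induction a with
  | nil => simp [canonC, combineRec]
  | cons x a' ih =>
    simp only [canonC, List.foldr_cons, List.cons_append] at *
    rw [ih, ← combineRec_singleton, ← combineRec_singleton, combineRec_assoc]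

lemma combineB_eq : ∀ (l r : List (Int × Int)), combineB l r = combineRec l r := by
  intro l
  induction l with
  | nil => intro r; cases r <;> simp [combineB, combineRec]
  | cons x l' ih =>
    intro r
    cases l' with
    | nil =>
      cases r with
      | nil => simp [combineB, combineRec]
      | cons y yt =>
        by_cases h : x.1 = y.1 <;> simp [combineB, combineRec, h]
    | cons y xs =>
      have hgl : (x :: y :: xs).getLast? = (y :: xs).getLast? := by
        simp [List.getLast?_cons_cons]
      rw [show combineRec (x :: y :: xs) r = x :: combineRec (y :: xs) r from by simp [combineRec], ← ih r]
      unfold combineB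
      rw [hgl]
      obtain ⟨lp, hlp⟩ : ∃ lp, (y :: xs).getLast? = some lp := ⟨(y :: xs).getLast (by simp), List.getLast?_eq_some_getLast (by simp)⟩
      rw [hlp]
      cases r with
      | nil => simp
      | cons rp rt =>
        by_cases h : lp.1 = rp.1 <;> simp [h, List.dropLast_cons_of_ne_nil]

lemma mergeRunsB_eq_canonC (ops : List (Int × Int)) : mergeRunsB ops = canonC ops := by
  induction hn : ops.length using Nat.strong_induction_on generalizing ops with
  | _ n ih =>
    subst hn
    by_cases h : ops.length ≤ 1
    · rw [mergeRunsB, if_pos h]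
      match ops, h with
      | [], _ => rfl
      | [x], _ => rfl
    · rw [mergeRunsB, if_neg h, combineB_eq,
        ih (ops.take (ops.length / 2)).length (by simp; omega) _ rfl,
        ih (ops.drop (ops.length / 2)).length (by simp; omega) _ rfl,
        ← canonC_append, List.take_append_drop]

lemma combineRec_append_single (u : List (Int × Int)) (o l x1 x2 : Int) :
    combineRec (u ++ [(o, l)]) [(x1, x2)] =
      if o == x1 then u ++ [(o, l + x2)] else u ++ [(o, l), (x1, x2)] := by
  induction u with
  | nil => by_cases h : o = x1 <;> simp [combineRec, h]
  | cons z u' ih =>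
    cases hu : u' ++ [(o, l)] with
    | nil => simp at hu
    | cons w ws =>
      rw [List.cons_append, hu,
        show combineRec (z :: w :: ws) [(x1, x2)] = z :: combineRec (w :: ws) [(x1, x2)] from by
          simp [combineRec], ← hu, ih]
      by_cases h : o = x1 <;> simp [h]

lemma mergeALoop_eq : ∀ (t : List (Int × Int)) (o l : Int) (rs : List (Int × Int)),
    mergeALoop ((o, l) :: rs) t = combineRec (rs.reverse ++ [(o, l)]) (canonC t) := by
  intro t
  induction t with
  | nil => intro o l rs; simp [mergeALoop, canonC, combineRec_nil_right]
  | cons hd t ih =>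
    intro o l rs
    obtain ⟨op, len⟩ := hd
    have hstep : canonC ((op, len) :: t) = combineRec [(op, len)] (canonC t) := by
      simp [canonC, combineRec_singleton, stepC]
    rw [hstep, ← combineRec_assoc]
    by_cases h : op = o
    · subst h
      rw [show mergeALoop ((op, l) :: rs) ((op, len) :: t) = mergeALoop ((op, l + len) :: rs) t from by
            simp [mergeALoop], ih]
      congr 1
      rw [combineRec_append_single]
      simp
    · rw [show mergeALoop ((o, l) :: rs) ((op, len) :: t) = mergeALoop ((op, len) :: (o, l) :: rs) t from by
            simp [mergeALoop, h], ih]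
      have h' : ¬ (o = op) := fun hh => h hh.symm
      congr 1
      rw [combineRec_append_single]
      simp [h']

-- ===== VERDICT (by name: the statement is the Claim_ definition above) =====
theorem merge_cigar_ops_py_spec : Claim_equal_merge_cigar_ops_py := by
  intro ops _
  unfold Spec_merge_cigar_ops_py merge_cigar_ops_py merge_cigar_ops_py_alt
  rw [mergeRunsB_eq_canonC]
  cases ops with
  | nil => rfl
  | cons h t =>
    obtain ⟨o, l⟩ := h
    change (mergeALoop [(o, l)] t).filter (fun p => decide (p.2 > 0)) = _
    rw [mergeALoop_eq t o l [], List.reverse_nil, List.nil_append, combineRec_singleton]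
    rfl
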